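-- pv_equiv track=rewrite | github.com/lifest01/Codewars | Strip Comments.py | solution
-- ===== SOURCE A (Python) =====
-- def solution(string, markers):
--     s = string.split('\n')
--     for i,line in enumerate(s):
--         for j in markers:
--             index = line.find(j)
--             if index != -1:
--                 line = line[:line.find(j)]
--         s[i] = line.rstrip(' ')
--     return '\n'.join(s)
-- ===== SOURCE B (Python) =====
-- def solution(string, markers):
--     out = []
--     for line in string.split('\n'):
--         cut = len(line)
--         for i in range(len(line)):
--             if any(line.startswith(m, i) for m in markers):
--                 cut = i
--                 break
--         out.append(line[:cut].rstrip(' '))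
--     return '\n'.join(out)
-- ===== Notes on version B (the rewrite author's own statement) =====
-- stated objective: alternative
-- what changed: A truncates each line once per marker via repeated str.find; B makes a single left-to-right position scan per line and cuts at the first position where any marker matches.
-- outside the precondition, e.g. on solution('abXc', ['Xc', 'bX']): A returns 'ab', B returns 'a'; on solution('aaa', ['aa']): A returns '', B returns ''
import Mathlib
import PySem

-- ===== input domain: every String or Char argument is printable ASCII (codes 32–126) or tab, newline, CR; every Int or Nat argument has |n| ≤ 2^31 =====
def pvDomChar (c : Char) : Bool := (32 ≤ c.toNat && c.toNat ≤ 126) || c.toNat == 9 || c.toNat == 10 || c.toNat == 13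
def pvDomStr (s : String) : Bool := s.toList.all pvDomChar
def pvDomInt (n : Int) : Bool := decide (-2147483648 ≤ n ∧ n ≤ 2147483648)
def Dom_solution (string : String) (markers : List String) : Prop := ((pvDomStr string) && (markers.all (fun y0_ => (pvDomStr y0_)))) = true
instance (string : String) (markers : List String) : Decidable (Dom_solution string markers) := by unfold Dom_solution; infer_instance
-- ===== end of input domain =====

-- B replaces A's marker-by-marker find-and-truncate loop by a single left-to-right
-- position scan per line that cuts at the first position where any marker matches
-- (objective: alternative, same cost).

-- ===== PORT A =====
-- line.rstrip(' '): exact port — drops only ' ' (not tab/newline) from the right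
def pyRstripSpace (cs : List Char) : List Char :=
  (cs.reverse.dropWhile (fun c => c == ' ')).reverse

-- inner 'for j in markers' loop of A: repeated find-and-truncate on the current line
def aProcess (markers : List (List Char)) (line : List Char) : List Char :=
  markers.foldl (fun l j =>
    let index := PySem.Chars.find l j
    if index ≠ -1 then PySem.Chars.slice l none (some index) else l) line

def solution (string : String) (markers : List String) : String :=
  let s := (PySem.Chars.split? string.toList ['\n']).getD []
  let s2 := s.map (fun line => pyRstripSpace (aProcess (markers.map String.toList) line))
  String.ofList (PySem.Chars.join ['\n'] s2)

-- ===== PORT B =====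
-- B's 'for i in range(len(line)): if any(line.startswith(m, i) …): cut = i; break',
-- with cut = len(line) when no position matches
def bCut (markers : List (List Char)) : List Char → Nat
  | [] => 0
  | c :: t => if markers.any (fun m => m.isPrefixOf (c :: t)) then 0 else bCut markers t + 1

def solution_alt (string : String) (markers : List String) : String :=
  let ms := markers.map String.toList
  let out := ((PySem.Chars.split? string.toList ['\n']).getD []).map
    (fun line => pyRstripSpace ((line.take (bCut ms line))))
  String.ofList (PySem.Chars.join ['\n'] out)

-- ===== PRECONDITION & SPEC =====
-- no occurrence of one marker starts strictly inside the span of an occurrence of another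
def NoOverlap (ms : List (List Char)) (line : List Char) : Prop :=
  ∀ m ∈ ms, ∀ m' ∈ ms, ∀ q ∈ List.range (line.length + 1), ∀ p ∈ List.range (line.length + 1),
    m'.isPrefixOf (line.drop q) → m.isPrefixOf (line.drop p) → q < p → q + m'.length ≤ p

-- Pre_ excludes inputs where, on some line, a marker occurrence starts strictly inside the
-- span of another marker occurrence: there A's sequential truncation makes the result depend
-- on the order of the markers list (an unspecified corner), while B always cuts at the
-- leftmost marker occurrence.
def Pre_solution (string : String) (markers : List String) : Prop :=
  ∀ line ∈ (PySem.Chars.split? string.toList ['\n']).getD [],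
    NoOverlap (markers.map String.toList) line
instance (string : String) (markers : List String) : Decidable (Pre_solution string markers) := by
  unfold Pre_solution NoOverlap; infer_instance

def pvWitness_solution : String × List String := ("a # comment ", ["#", "!!"])

def Spec_solution (string : String) (markers : List String) (out : String) : Prop := out = solution_alt string markers
instance (string : String) (markers : List String) (out : String) : Decidable (Spec_solution string markers out) := by unfold Spec_solution; infer_instance

-- ===== CLAIM (what is proved, stated in full; the proofs are below) =====
def Claim_equal_solution : Prop := ∀ (string : String) (markers : List String), Dom_solution string markers → Pre_solution string markers → Spec_solution string markers (solution string markers)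

-- ===== LEMMAS AND PROOFS =====

-- first occurrence of m in ℓ, ℓ.length if absent (proof-side view of A's find)
def occD (ℓ m : List Char) : Nat :=
  if PySem.Chars.find ℓ m = -1 then ℓ.length else (PySem.Chars.find ℓ m).toNat

-- the cut A's foldl reaches, seen as a running minimum over first occurrences in the ORIGINAL line
def foldMin (ms : List (List Char)) (ℓ : List Char) (c : Nat) : Nat :=
  ms.foldl (fun a m => min a (occD ℓ m)) c

-- c is a legal truncation point: end of line or start of an occurrence of some marker
def CutPt (ms : List (List Char)) (ℓ : List Char) (c : Nat) : Prop :=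
  c = ℓ.length ∨ (c ≤ ℓ.length ∧ ∃ m ∈ ms, m <+: ℓ.drop c)

theorem occD_spec (ℓ m : List Char) (h : PySem.Chars.find ℓ m ≠ -1) :
    m <+: ℓ.drop (occD ℓ m) ∧ ∀ i < occD ℓ m, ¬ m <+: ℓ.drop i := by
  have h0 : 0 ≤ PySem.Chars.find ℓ m := by
    have := PySem.Chars.neg_one_le_find ℓ m; omega
  have := PySem.Chars.find_spec (s := ℓ) (sub := m) h0
  unfold occD; rw [if_neg h]; exact this

theorem occD_min (ℓ m : List Char) (i : Nat) (hi : m <+: ℓ.drop i) : occD ℓ m ≤ i := by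
  have hne : PySem.Chars.find ℓ m ≠ -1 := by
    rw [PySem.Chars.find_ne_neg_one_iff]
    rw [← PySem.Chars.isIn_iff_infix, ← PySem.Chars.exists_prefix_drop_iff_isIn]
    exact ⟨i, hi⟩
  by_contra hlt
  exact (occD_spec ℓ m hne).2 i (by omega) hi

theorem foldMin_le_init (ms : List (List Char)) (ℓ : List Char) (c : Nat) :
    foldMin ms ℓ c ≤ c := by
  induction ms generalizing c with
  | nil => exact le_rfl
  | cons m rest ih =>
    calc foldMin rest ℓ (min c (occD ℓ m)) ≤ min c (occD ℓ m) := ih _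
      _ ≤ c := min_le_left _ _

theorem foldMin_le_occ (ms : List (List Char)) (ℓ : List Char) (c : Nat)
    (m : List Char) (hm : m ∈ ms) : foldMin ms ℓ c ≤ occD ℓ m := by
  induction ms generalizing c with
  | nil => cases hm
  | cons m0 rest ih =>
    rcases List.mem_cons.mp hm with h | h
    · subst h
      calc foldMin rest ℓ (min c (occD ℓ m)) ≤ min c (occD ℓ m) := foldMin_le_init _ _ _
        _ ≤ occD ℓ m := min_le_right _ _
    · exact ih _ h

theorem foldMin_cases (ms : List (List Char)) (ℓ : List Char) (c : Nat) :
    foldMin ms ℓ c = c ∨ ∃ m ∈ ms, foldMin ms ℓ c = occD ℓ m := by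
  induction ms generalizing c with
  | nil => exact Or.inl rfl
  | cons m0 rest ih =>
    have hh : foldMin (m0 :: rest) ℓ c = foldMin rest ℓ (min c (occD ℓ m0)) := rfl
    rw [hh]
    rcases ih (min c (occD ℓ m0)) with h | ⟨m, hm, h⟩
    · rcases le_total c (occD ℓ m0) with hle | hle
      · left; rw [h]; omega
      · right; exact ⟨m0, List.mem_cons_self, by rw [h]; omega⟩
    · right; exact ⟨m, List.mem_cons_of_mem _ hm, h⟩

theorem bCut_le_length (ms : List (List Char)) (ℓ : List Char) : bCut ms ℓ ≤ ℓ.length := by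
  induction ℓ with
  | nil => simp [bCut]
  | cons c t ih =>
    simp only [bCut]
    split
    · simp
    · simp only [List.length_cons]
      omega

theorem bCut_no_match (ms : List (List Char)) (ℓ : List Char) (i : Nat)
    (hi : i < bCut ms ℓ) (m : List Char) (hm : m ∈ ms) : ¬ m <+: ℓ.drop i := by
  induction ℓ generalizing i with
  | nil => simp [bCut] at hi
  | cons c t ih =>
    by_cases hyes : ms.any (fun m => m.isPrefixOf (c :: t)) = true
    · have hb : bCut ms (c :: t) = 0 := by simp only [bCut, hyes, if_true]
      omega
    · have hb : bCut ms (c :: t) = bCut ms t + 1 := by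
        simp only [bCut, hyes, if_false, Bool.false_eq_true]
      rw [hb] at hi
      cases i with
      | zero =>
        intro hpre
        exact hyes (List.any_eq_true.mpr ⟨m, hm, List.isPrefixOf_iff_prefix.mpr hpre⟩)
      | succ j => exact ih j (by omega)

theorem bCut_match (ms : List (List Char)) (ℓ : List Char) (h : bCut ms ℓ < ℓ.length) :
    ∃ m ∈ ms, m <+: ℓ.drop (bCut ms ℓ) := by
  induction ℓ with
  | nil => simp [bCut] at h
  | cons c t ih =>
    by_cases hyes : ms.any (fun m => m.isPrefixOf (c :: t)) = true
    · have hb : bCut ms (c :: t) = 0 := by simp only [bCut, hyes, if_true]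
      rw [hb]
      obtain ⟨m, hm, hpre⟩ := List.any_eq_true.mp hyes
      exact ⟨m, hm, by simpa using List.isPrefixOf_iff_prefix.mp hpre⟩
    · have hb : bCut ms (c :: t) = bCut ms t + 1 := by
        simp only [bCut, hyes, if_false, Bool.false_eq_true]
      rw [hb] at h ⊢
      simp only [List.length_cons] at h
      obtain ⟨m, hm, hpre⟩ := ih (by omega)
      exact ⟨m, hm, by simpa using hpre⟩

-- B's position scan equals the running minimum of first occurrences
theorem foldMin_eq_bCut (ms : List (List Char)) (ℓ : List Char) :
    foldMin ms ℓ ℓ.length = bCut ms ℓ := by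
  apply le_antisymm
  · rcases Nat.lt_or_ge (bCut ms ℓ) ℓ.length with h | h
    · obtain ⟨m, hm, hpre⟩ := bCut_match ms ℓ h
      calc foldMin ms ℓ ℓ.length ≤ occD ℓ m := foldMin_le_occ _ _ _ _ hm
        _ ≤ bCut ms ℓ := occD_min _ _ _ hpre
    · calc foldMin ms ℓ ℓ.length ≤ ℓ.length := foldMin_le_init _ _ _
        _ ≤ bCut ms ℓ := by have := bCut_le_length ms ℓ; omega
  · rcases foldMin_cases ms ℓ ℓ.length with h | ⟨m, hm, h⟩
    · rw [h]; exact bCut_le_length ms ℓ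
    · rw [h]
      by_contra hlt
      have hne : PySem.Chars.find ℓ m ≠ -1 := by
        by_contra he
        unfold occD at hlt h
        rw [if_pos he] at hlt
        have := bCut_le_length ms ℓ; omega
      exact bCut_no_match ms ℓ (occD ℓ m) (by omega) m hm (occD_spec ℓ m hne).1

theorem prefix_take_of_le {m ℓ : List Char} (k : Nat) (h : m <+: ℓ) (hk : m.length ≤ k) :
    m <+: ℓ.take k := by
  rw [List.prefix_take_iff]
  exact ⟨h, hk⟩

-- occurrences below a legal cut point survive truncation at it (this is where Pre_ is used)
theorem occ_survives (ms : List (List Char)) (ℓ : List Char) (hno : NoOverlap ms ℓ)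
    (c : Nat) (hc : CutPt ms ℓ c) (m : List Char) (hm : m ∈ ms)
    (q : Nat) (hq : q < c) (hpre : m <+: ℓ.drop q) : m <+: (ℓ.take c).drop q := by
  rcases hc with hc | ⟨hcle, m', hm', hpre'⟩
  · rw [hc, List.take_length]
    exact hpre
  · -- c is the start of an occurrence of m' ∈ ms; NoOverlap gives q + |m| ≤ c
    have hle : q + m.length ≤ c :=
      hno m' hm' m hm q (by simp only [List.mem_range]; omega)
        c (by simp only [List.mem_range]; omega)
        (List.isPrefixOf_iff_prefix.mpr hpre) (List.isPrefixOf_iff_prefix.mpr hpre') hq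
    rw [List.drop_take]
    exact prefix_take_of_le _ hpre (by omega)

-- the main loop invariant: A's foldl over the truncated line computes take of the running minimum
theorem aProcess_take (ms0 : List (List Char)) (ℓ : List Char) (hno : NoOverlap ms0 ℓ) :
    ∀ (ms : List (List Char)), (∀ m ∈ ms, m ∈ ms0) →
    ∀ (c : Nat), c ≤ ℓ.length → CutPt ms0 ℓ c →
    aProcess ms (ℓ.take c) = ℓ.take (foldMin ms ℓ c) := by
  intro ms
  induction ms with
  | nil =>
    intro _ c hcle _
    simp [aProcess, foldMin]
  | cons m rest ih =>
    intro hsub c hcle hc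
    have hm0 : m ∈ ms0 := hsub m List.mem_cons_self
    show aProcess rest _ = ℓ.take (foldMin rest ℓ (min c (occD ℓ m)))
    by_cases hf : PySem.Chars.find (ℓ.take c) m = -1
    · -- m does not occur in the truncated line; by Pre_ it has no occurrence before c in ℓ either
      have hstep : (if PySem.Chars.find (ℓ.take c) m ≠ -1 then
          PySem.Chars.slice (ℓ.take c) none (some (PySem.Chars.find (ℓ.take c) m))
          else ℓ.take c) = ℓ.take c := by simp [hf]
      have hcocc : c ≤ occD ℓ m := by
        by_contra hgt
        have hne : PySem.Chars.find ℓ m ≠ -1 := by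
          unfold occD at hgt; by_contra he; rw [if_pos he] at hgt; omega
        have hpre := (occD_spec ℓ m hne).1
        have hsurv := occ_survives ms0 ℓ hno c hc m hm0 (occD ℓ m) (by omega) hpre
        rw [PySem.Chars.find_eq_neg_one_iff] at hf
        apply hf
        rw [← PySem.Chars.isIn_iff_infix, ← PySem.Chars.exists_prefix_drop_iff_isIn]
        exact ⟨occD ℓ m, hsurv⟩
      have hmin : min c (occD ℓ m) = c := by omega
      simp only [aProcess]
      rw [hstep, hmin]
      exact ih (fun x hx => hsub x (List.mem_cons_of_mem _ hx)) c hcle hc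
    · -- m occurs in the truncated line at q0 = first occurrence; the new cut is q0
      have h0 : 0 ≤ PySem.Chars.find (ℓ.take c) m := by
        have := PySem.Chars.neg_one_le_find (ℓ.take c) m; omega
      set q0 : Nat := (PySem.Chars.find (ℓ.take c) m).toNat with hq0def
      have hspec := PySem.Chars.find_spec (s := ℓ.take c) (sub := m) h0
      have hq0le : q0 ≤ c := by
        have := PySem.Chars.find_le_length (ℓ.take c) m
        have hlen : (ℓ.take c).length = c := by
          rw [List.length_take]; omega
        omega
      have hpreℓ : m <+: ℓ.drop q0 := by
        have := hspec.1
        rw [List.drop_take] at this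
        exact this.trans (List.take_prefix _ _)
      -- the truncation step rewrites to take q0 of ℓ
      have hstep : (if PySem.Chars.find (ℓ.take c) m ≠ -1 then
          PySem.Chars.slice (ℓ.take c) none (some (PySem.Chars.find (ℓ.take c) m))
          else ℓ.take c) = ℓ.take q0 := by
        rw [if_pos hf, PySem.Chars.slice_eq_listSlice, PySem.List.slice_to _ h0,
          List.take_take, ← hq0def, min_eq_left hq0le]
      -- q0 is also the value of min c (occD ℓ m)
      have hocc : occD ℓ m = q0 := by
        have hle : occD ℓ m ≤ q0 := occD_min ℓ m q0 hpreℓ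
        by_contra hne'
        have hlt : occD ℓ m < q0 := by omega
        have hneℓ : PySem.Chars.find ℓ m ≠ -1 := by
          unfold occD at hlt; by_contra he; rw [if_pos he] at hlt; omega
        have hsurv := occ_survives ms0 ℓ hno c hc m hm0 (occD ℓ m) (by omega)
          (occD_spec ℓ m hneℓ).1
        exact hspec.2 (occD ℓ m) (by omega) hsurv
      have hmin : min c (occD ℓ m) = q0 := by omega
      simp only [aProcess]
      rw [hstep, hmin]
      exact ih (fun x hx => hsub x (List.mem_cons_of_mem _ hx)) q0 (by omega)
        (Or.inr ⟨by omega, m, hm0, hpreℓ⟩)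

theorem line_eq (ms : List (List Char)) (ℓ : List Char) (hno : NoOverlap ms ℓ) :
    aProcess ms ℓ = ℓ.take (bCut ms ℓ) := by
  have := aProcess_take ms ℓ hno ms (fun _ h => h) ℓ.length le_rfl (Or.inl rfl)
  rw [List.take_length] at this
  rw [this, foldMin_eq_bCut]

-- ===== VERDICT (by name: the statement is the Claim_ definition above) =====
theorem solution_spec : Claim_equal_solution := by
  intro string markers _ hpre
  show solution string markers = solution_alt string markers
  unfold solution solution_alt
  dsimp only
  congr 2
  apply List.map_congr_left
  intro line hline
  have hno := hpre line hline
  rw [line_eq _ _ hno]
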